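-- pv_equiv track=rewrite | github.com/MarcelArndt/Coderr-Backend | market_app/api/serializers.py | manipulate_validated_data
-- ===== SOURCE A (Python) =====
-- def manipulate_validated_data(details):
--     all_prices = []
--     all_dates = []
--     for each_detail in details:
--         all_prices.append(each_detail["price"])
--         all_dates.append(each_detail["delivery_time_in_days"])
--     min_price = min(all_prices, default=0)
--     min_date = min (all_dates, default=0)
--     return (min_price, min_date)
-- ===== SOURCE B (Python) =====
-- def manipulate_validated_data(details):
--     min_price = None
--     min_date = None
--     for each_detail in details:
--         price = each_detail["price"]
--         date = each_detail["delivery_time_in_days"]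
--         if min_price is None or price < min_price:
--             min_price = price
--         if min_date is None or date < min_date:
--             min_date = date
--     return (0 if min_price is None else min_price,
--             0 if min_date is None else min_date)
-- ===== Notes on version B (the rewrite author's own statement) =====
-- stated objective: alternative
-- what changed: Instead of building two intermediate lists and calling min(..., default=0) on each, B makes a single pass threading two running Optional minima through the loop and substitutes 0 only at the end.
import Mathlib
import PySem

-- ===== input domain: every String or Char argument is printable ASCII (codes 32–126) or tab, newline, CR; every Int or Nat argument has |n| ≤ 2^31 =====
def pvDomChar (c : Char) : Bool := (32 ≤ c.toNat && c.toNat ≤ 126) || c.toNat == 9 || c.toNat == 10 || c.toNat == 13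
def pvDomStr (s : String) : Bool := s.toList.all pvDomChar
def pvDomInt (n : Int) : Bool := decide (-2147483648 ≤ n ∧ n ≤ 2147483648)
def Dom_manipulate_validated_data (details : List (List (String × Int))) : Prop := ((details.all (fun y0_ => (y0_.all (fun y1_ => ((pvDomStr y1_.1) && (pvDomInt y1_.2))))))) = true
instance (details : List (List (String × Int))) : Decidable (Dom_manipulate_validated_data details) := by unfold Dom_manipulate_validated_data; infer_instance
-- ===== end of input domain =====

-- B replaces A's two intermediate lists + min(..., default=0) by a single pass threading two running Optional minima (alternative decomposition, O(1) extra space).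


-- shared helper: each_detail["price"] / each_detail["delivery_time_in_days"]
-- (KeyError inputs are excluded by Pre_; the `.getD 0` is never reached inside Pre_)
def pvPrice (d : List (String × Int)) : Int := ((PySem.Dict.mk d).get? "price").getD 0
def pvDate (d : List (String × Int)) : Int := ((PySem.Dict.mk d).get? "delivery_time_in_days").getD 0

-- ===== PORT A =====
def manipulate_validated_data (details : List (List (String × Int))) : Int × Int :=
  let lists := details.foldl
    (fun (acc : List Int × List Int) each_detail =>
      (acc.1 ++ [pvPrice each_detail], acc.2 ++ [pvDate each_detail])) ([], [])
  let min_price := PySem.List.minD lists.1 (fun x => x) 0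
  let min_date := PySem.List.minD lists.2 (fun x => x) 0
  (min_price, min_date)

-- ===== PORT B =====
def manipulate_validated_data_alt (details : List (List (String × Int))) : Int × Int :=
  let st := details.foldl
    (fun (acc : Option Int × Option Int) each_detail =>
      let price := pvPrice each_detail
      let date := pvDate each_detail
      ((match acc.1 with
        | none => some price
        | some m => if price < m then some price else some m),
       (match acc.2 with
        | none => some date
        | some m => if date < m then some date else some m))) (none, none)
  (st.1.getD 0, st.2.getD 0)

-- ===== PRECONDITION & SPEC =====
-- Pre_ excludes exactly the inputs where some detail lacks "price" or "delivery_time_in_days": A raises KeyError there.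
def Pre_manipulate_validated_data (details : List (List (String × Int))) : Prop :=
  (details.all (fun d => d.any (fun kv => kv.1 == "price") && d.any (fun kv => kv.1 == "delivery_time_in_days"))) = true
instance (details : List (List (String × Int))) : Decidable (Pre_manipulate_validated_data details) := by unfold Pre_manipulate_validated_data; infer_instance
def pvWitness_manipulate_validated_data : (List (List (String × Int))) :=
  [[("price", 7), ("delivery_time_in_days", 3)], [("price", 2), ("delivery_time_in_days", 9)]]
def Spec_manipulate_validated_data (details : List (List (String × Int))) (out : Int × Int) : Prop := out = manipulate_validated_data_alt details
instance (details : List (List (String × Int))) (out : Int × Int) : Decidable (Spec_manipulate_validated_data details out) := by unfold Spec_manipulate_validated_data; infer_instance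

-- ===== CLAIM (what is proved, stated in full; the proofs are below) =====
def Claim_equal_manipulate_validated_data : Prop := ∀ (details : List (List (String × Int))), Dom_manipulate_validated_data details → Pre_manipulate_validated_data details → Spec_manipulate_validated_data details (manipulate_validated_data details)

-- ===== LEMMAS AND PROOFS =====

-- A's loop just maps pvPrice / pvDate over details, appended to the accumulators.
theorem pvFoldA_eq (details : List (List (String × Int))) (acc1 acc2 : List Int) :
    details.foldl
      (fun (acc : List Int × List Int) each_detail =>
        (acc.1 ++ [pvPrice each_detail], acc.2 ++ [pvDate each_detail])) (acc1, acc2)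
    = (acc1 ++ details.map pvPrice, acc2 ++ details.map pvDate) := by
  induction details generalizing acc1 acc2 with
  | nil => simp
  | cons d t ih => simp [List.foldl, ih]

-- B's loop from (some a, some b) is the running minimum of the projections.
theorem pvFoldB_some (details : List (List (String × Int))) (a b : Int) :
    details.foldl
      (fun (acc : Option Int × Option Int) each_detail =>
        let price := pvPrice each_detail
        let date := pvDate each_detail
        ((match acc.1 with
          | none => some price
          | some m => if price < m then some price else some m),
         (match acc.2 with
          | none => some date
          | some m => if date < m then some date else some m))) (some a, some b)
    = (some ((details.map pvPrice).foldl min a), some ((details.map pvDate).foldl min b)) := by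
  induction details generalizing a b with
  | nil => simp
  | cons d t ih =>
      simp only [List.foldl, List.map]
      rw [show (if pvPrice d < a then some (pvPrice d) else some a) = some (min a (pvPrice d)) by
            rcases lt_or_ge (pvPrice d) a with h | h <;> simp [min_def, h],
          show (if pvDate d < b then some (pvDate d) else some b) = some (min b (pvDate d)) by
            rcases lt_or_ge (pvDate d) b with h | h <;> simp [min_def, h]]
      exact ih (min a (pvPrice d)) (min b (pvDate d))

-- ===== VERDICT (by name: the statement is the Claim_ definition above) =====
theorem manipulate_validated_data_spec : Claim_equal_manipulate_validated_data := by
  intro details _ _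
  unfold Spec_manipulate_validated_data manipulate_validated_data manipulate_validated_data_alt
  cases details with
  | nil => rfl
  | cons d t =>
      rw [pvFoldA_eq]
      simp only [List.nil_append, List.map, List.foldl]
      rw [pvFoldB_some]
      simp [PySem.List.minD, PySem.List.min?_id_cons]
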